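-- pv_equiv track=rewrite | github.com/Michael808-808/fun-things | solve_sudoku.py | scan_row
-- ===== SOURCE A (Python) =====
-- def scan_row(x,tempdict):
--     #x is a tuple representing the index of the box being compared to its row
--     #tempdict is the dictionary representing the sudoku matrix
--     nums=[1,2,3,4,5,6,7,8,9]
--     row_keys=[]
--     for j in tempdict.keys():
--         if j[0]==x[0]:
--             row_keys.append(j)
--     for k in row_keys:
--         if tempdict[k] in nums:
--             nums.remove(tempdict[k])
--     return nums
-- ===== SOURCE B (Python) =====
-- def scan_row(x, tempdict):
--     # Loop over the nine candidate digits; keep a digit iff no cell in row x[0] holds it.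
--     items = list(tempdict.items())
--     return [n for n in range(1, 10)
--             if not any(j[0] == x[0] and v == n for j, v in items)]
-- ===== Notes on version B (the rewrite author's own statement) =====
-- stated objective: simpler
-- what changed: B inverts the loop structure: instead of scanning the dict to collect the row's keys and then deleting each found value from a mutable candidate list, B loops over the nine digits and keeps each digit iff no same-row cell holds it (a per-digit membership scan, nothing mutated).
import Mathlib
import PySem

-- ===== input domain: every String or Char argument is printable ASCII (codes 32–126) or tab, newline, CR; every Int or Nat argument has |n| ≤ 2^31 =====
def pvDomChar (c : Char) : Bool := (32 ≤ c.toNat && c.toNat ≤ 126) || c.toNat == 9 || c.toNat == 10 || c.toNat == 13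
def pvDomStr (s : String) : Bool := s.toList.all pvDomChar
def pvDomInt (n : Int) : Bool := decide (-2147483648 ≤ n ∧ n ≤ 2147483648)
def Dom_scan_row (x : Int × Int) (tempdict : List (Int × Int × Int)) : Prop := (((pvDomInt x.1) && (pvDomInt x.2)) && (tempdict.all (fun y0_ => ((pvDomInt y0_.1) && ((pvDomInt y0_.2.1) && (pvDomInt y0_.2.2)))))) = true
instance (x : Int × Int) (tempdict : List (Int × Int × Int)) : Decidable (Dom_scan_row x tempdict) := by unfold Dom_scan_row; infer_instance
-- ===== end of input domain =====

-- B inverts A's loop structure: instead of collecting the row's keys and deleting each found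
-- value from a mutable candidate list, B loops over the nine digits and keeps each digit iff
-- no same-row cell holds it (simpler decomposition, no mutation).


-- the Python dict: assoc-list entries (r, c, v) inserted in order, last value wins, first position kept
def pvDictOf (tempdict : List (Int × Int × Int)) : PySem.Dict (Int × Int) Int :=
  tempdict.foldl (fun d e => d.insert (e.1, e.2.1) e.2.2) PySem.Dict.empty

-- ===== PORT A =====
def scan_row (x : Int × Int) (tempdict : List (Int × Int × Int)) : List Int :=
  let d := pvDictOf tempdict
  let row_keys := (PySem.Dict.keys d).foldl
    (fun acc j => if j.1 == x.1 then acc ++ [j] else acc) []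
  row_keys.foldl
    (fun nums k =>
      if nums.contains (d.getD k 0) then
        (PySem.List.remove? nums (d.getD k 0)).getD nums
      else nums)
    [1, 2, 3, 4, 5, 6, 7, 8, 9]

-- ===== PORT B =====
def scan_row_alt (x : Int × Int) (tempdict : List (Int × Int × Int)) : List Int :=
  let items := (pvDictOf tempdict).items
  (PySem.List.pyRange 1 10 1).filter
    (fun n => !(items.any (fun p => p.1.1 == x.1 && p.2 == n)))

-- ===== PRECONDITION & SPEC =====
def Spec_scan_row (x : Int × Int) (tempdict : List (Int × Int × Int)) (out : List Int) : Prop := out = scan_row_alt x tempdict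
instance (x : Int × Int) (tempdict : List (Int × Int × Int)) (out : List Int) : Decidable (Spec_scan_row x tempdict out) := by unfold Spec_scan_row; infer_instance

-- ===== CLAIM (what is proved, stated in full; the proofs are below) =====
def Claim_equal_scan_row : Prop := ∀ (x : Int × Int) (tempdict : List (Int × Int × Int)), Dom_scan_row x tempdict → Spec_scan_row x tempdict (scan_row x tempdict)

-- ===== LEMMAS AND PROOFS =====

-- the keys of the built dict are unique
theorem pvDictOf_keys_nodup (tempdict : List (Int × Int × Int)) :
    (pvDictOf tempdict).keys.Nodup := by
  have := PySem.Dict.nodup_keys_foldl_insert_key tempdict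
    (fun e => (e.1, e.2.1)) (fun d e => e.2.2) PySem.Dict.empty
    (by simp [PySem.Dict.keys_empty])
  simpa [pvDictOf] using this

-- A's removal loop on a Nodup list is a filter
theorem pvLoopA (g : (Int × Int) → Int) (ks : List (Int × Int)) (nums : List Int)
    (h : nums.Nodup) :
    ks.foldl
      (fun nums k =>
        if nums.contains (g k) then (PySem.List.remove? nums (g k)).getD nums else nums)
      nums
    = nums.filter (fun n => ks.all (fun k => g k != n)) := by
  induction ks generalizing nums with
  | nil => simp
  | cons k ks ih =>
    have hstep :
        (if nums.contains (g k) then (PySem.List.remove? nums (g k)).getD nums else nums)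
        = nums.filter (fun n => g k != n) := by
      by_cases hm : g k ∈ nums
      · rw [if_pos (by simpa using hm), PySem.List.remove?_eq_some_erase nums _ hm,
          Option.getD_some, h.erase_eq_filter]
        apply List.filter_congr
        intro a _
        simp [bne, BEq.comm]
      · rw [if_neg (by simpa using hm)]
        symm
        apply List.filter_eq_self.2
        intro a ha
        simp only [bne_iff_ne, ne_eq]
        intro hc; exact hm (hc ▸ ha)
    rw [List.foldl_cons, hstep, ih _ (h.filter _), List.filter_filter]
    apply List.filter_congr
    intro a _
    simp [Bool.and_comm]

theorem scan_row_spec : Claim_equal_scan_row := by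
  intro x tempdict _
  unfold Spec_scan_row
  simp only [scan_row, scan_row_alt]
  set d := pvDictOf tempdict with hd
  have hnd : d.keys.Nodup := pvDictOf_keys_nodup tempdict
  rw [PySem.List.foldl_append_if_eq_filter, List.nil_append,
    pvLoopA (fun k => d.getD k 0) _ _ (by decide)]
  have hrange : ([1, 2, 3, 4, 5, 6, 7, 8, 9] : List Int) = PySem.List.pyRange 1 10 1 := by decide
  rw [hrange]
  apply List.filter_congr
  intro n _
  rw [Bool.eq_iff_iff]
  simp only [List.all_eq_true, Bool.not_eq_true', List.any_eq_false,
    Bool.and_eq_true, beq_iff_eq, not_and]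
  constructor
  · intro h p hpi hrow
    have hk : p.1 ∈ d.keys := PySem.Dict.mem_keys_of_mem_items _ hpi
    have hkf : p.1 ∈ d.keys.filter (fun j => j.1 == x.1) :=
      List.mem_filter.2 ⟨hk, by simp [hrow]⟩
    have := h p.1 hkf
    have hget : d.getD p.1 0 = p.2 := PySem.Dict.getD_of_mem_items _ hpi hnd 0
    simpa [hget] using this
  · intro h k hk
    rcases List.mem_filter.1 hk with ⟨hkeys, hrow⟩
    simp only [bne_iff_ne, ne_eq]
    intro heq
    have : ∃ p ∈ d.items, p.1 = k := by
      simpa [PySem.Dict.keys, List.mem_map] using hkeys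
    rcases this with ⟨p, hpi, rfl⟩
    have hget : d.getD p.1 0 = p.2 := PySem.Dict.getD_of_mem_items _ hpi hnd 0
    exact h p hpi (by simpa using hrow) (by rw [← hget, heq])
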